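-- pv_equiv track=rewrite | github.com/marcosviniciusi/unmanic-plugins | source/video_transcoder/lib/smart_black_bar_detect.py | _quorum
-- ===== SOURCE A (Python) =====
-- from collections import Counter
-- from typing import Iterable, List, Optional
--
-- def _quorum(last_three: List[str]) -> Optional[str]:
--     """
--     Given up to the last 3 observations, return:
--       - crop string if ≥2 agree on a non-'NO_CROP' value
--       - None if ≥2 are 'NO_CROP'
--       - None if no majority yet
--     """
--     if len(last_three) < 2:
--         return None
--     if len(last_three) == 2:
--         a, b = last_three
--         if a == b:
--             return None if a == "NO_CROP" else a
--         return None  # need a third to decide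
--     # len == 3
--     counts = Counter(last_three)
--     # Prefer a non-trivial crop
--     for val, cnt in counts.most_common():
--         if val != "NO_CROP" and cnt >= 2:
--             return val
--     if counts.get("NO_CROP", 0) >= 2:
--         return None
--     return None
-- ===== SOURCE B (Python) =====
-- def _quorum(last_three):
--     # One uniform pass: count occurrences, then pick the non-'NO_CROP' value
--     # with the highest count >= 2 (first occurrence wins ties); None otherwise.
--     counts = {}
--     for v in last_three:
--         counts[v] = counts.get(v, 0) + 1
--     best = None
--     best_cnt = 1
--     for v, c in counts.items():
--         if v != "NO_CROP" and c > best_cnt: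
--             best, best_cnt = v, c
--     return best
-- ===== Notes on version B (the rewrite author's own statement) =====
-- stated objective: simpler
-- what changed: Replaced A's length-based case split (len<2 / len==2 / Counter.most_common sort-and-scan) with one uniform pass: count occurrences into a dict, then a single argmax scan returning the first non-'NO_CROP' value of strictly maximal count >= 2.
import Mathlib
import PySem

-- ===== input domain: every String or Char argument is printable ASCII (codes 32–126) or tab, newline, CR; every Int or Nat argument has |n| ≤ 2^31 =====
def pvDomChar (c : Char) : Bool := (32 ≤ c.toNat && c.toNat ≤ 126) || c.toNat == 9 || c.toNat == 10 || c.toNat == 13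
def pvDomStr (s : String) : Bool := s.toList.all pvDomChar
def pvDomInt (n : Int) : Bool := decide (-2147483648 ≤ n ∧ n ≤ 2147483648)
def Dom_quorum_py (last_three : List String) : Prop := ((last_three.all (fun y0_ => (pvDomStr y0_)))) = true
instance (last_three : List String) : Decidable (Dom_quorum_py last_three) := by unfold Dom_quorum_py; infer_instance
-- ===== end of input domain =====

-- B replaces A's length-based case split (len<2 / len==2 / Counter.most_common scan)
-- by one uniform pass: count occurrences, then take the first non-'NO_CROP' value of
-- strictly maximal count ≥ 2; objective: simpler.

-- ===== PORT A =====
-- the 'for val, cnt in counts.most_common(): if val != "NO_CROP" and cnt >= 2: return val' loop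
def quorumForA : List (String × Int) → Option String
  | [] => none
  | (val, cnt) :: rest =>
      if val ≠ "NO_CROP" ∧ 2 ≤ cnt then some val else quorumForA rest

def quorum_py (last_three : List String) : Option String :=
  if last_three.length < 2 then none
  else if last_three.length = 2 then
    match last_three with
    | [a, b] => if a = b then (if a = "NO_CROP" then none else some a) else none
    | _ => none   -- unreachable under the length guard
  else
    let counts := PySem.Dict.counter last_three
    -- counts.most_common() = sorted(counts.items(), key=itemgetter(1), reverse=True)
    match quorumForA (PySem.List.sorted counts.items (fun p => p.2) true) with
    | some v => some v
    | none => if 2 ≤ counts.getD "NO_CROP" 0 then none else none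

-- ===== PORT B =====
def quorum_py_alt (last_three : List String) : Option String :=
  let counts := last_three.foldl (fun d v => d.insert v (d.getD v 0 + 1)) PySem.Dict.empty
  (counts.items.foldl
    (fun (acc : Option String × Int) p =>
      if p.1 ≠ "NO_CROP" ∧ acc.2 < p.2 then (some p.1, p.2) else acc)
    (none, 1)).1

-- ===== PRECONDITION & SPEC =====
def Spec_quorum_py (last_three : List String) (out : Option String) : Prop := out = quorum_py_alt last_three
instance (last_three : List String) (out : Option String) : Decidable (Spec_quorum_py last_three out) := by unfold Spec_quorum_py; infer_instance

-- ===== CLAIM (what is proved, stated in full; the proofs are below) =====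
def Claim_equal_quorum_py : Prop := ∀ (last_three : List String), Dom_quorum_py last_three → Spec_quorum_py last_three (quorum_py last_three)

-- ===== LEMMAS AND PROOFS =====

-- the majority test, as a Bool predicate on (value, count) pairs
def pvQ (p : String × Int) : Bool := decide (p.1 ≠ "NO_CROP" ∧ 2 ≤ p.2)

-- the 'reverse=True, key=count' insertion comparator of PySem.List.sorted
def pvBef (x y : String × Int) : Bool := decide (y.2 < x.2)

-- B's fold step
def pvStep (acc : Option String × Int) (p : String × Int) : Option String × Int :=
  if p.1 ≠ "NO_CROP" ∧ acc.2 < p.2 then (some p.1, p.2) else acc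

-- the current best count tracked by B's fold, read off from find? on the sorted prefix
def pvC (s : List (String × Int)) : Int :=
  match s.find? pvQ with
  | some p => p.2
  | none => 1

-- A's loop is find? with predicate pvQ, projected to the name
theorem quorumForA_eq_find? (s : List (String × Int)) :
    quorumForA s = (s.find? pvQ).map (·.1) := by
  induction s with
  | nil => rfl
  | cons p rest ih =>
      obtain ⟨val, cnt⟩ := p
      by_cases h : val ≠ "NO_CROP" ∧ 2 ≤ cnt
      · simp [quorumForA, pvQ, h]
      · simp [quorumForA, pvQ, h, ih]

theorem insertBy_cons_pos {α : Type} (before : α → α → Bool) (x y : α) (ys : List α)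
    (h : before x y = true) :
    PySem.List.insertBy before x (y :: ys) = x :: y :: ys := by
  simp [PySem.List.insertBy, h]

theorem insertBy_cons_neg {α : Type} (before : α → α → Bool) (x y : α) (ys : List α)
    (h : ¬ before x y = true) :
    PySem.List.insertBy before x (y :: ys) = y :: PySem.List.insertBy before x ys := by
  simp [PySem.List.insertBy, h]

-- how one stable descending insertion moves the first pvQ-element
theorem find?_insertBy (x : String × Int) (s : List (String × Int))
    (hs : s.Pairwise (fun a b => b.2 ≤ a.2))
    (hx : 1 ≤ x.2) (hs1 : ∀ p ∈ s, 1 ≤ p.2) :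
    (PySem.List.insertBy pvBef x s).find? pvQ =
      (if x.1 ≠ "NO_CROP" ∧ pvC s < x.2 then some x else s.find? pvQ) := by
  induction s with
  | nil =>
      by_cases h : x.1 ≠ "NO_CROP" ∧ 2 ≤ x.2
      · have hq : pvQ x = true := by simp [pvQ, h]
        have h2 : x.1 ≠ "NO_CROP" ∧ pvC [] < x.2 := ⟨h.1, by unfold pvC; simp; omega⟩
        simp only [PySem.List.insertBy, List.find?_cons_of_pos hq, if_pos h2]
      · have hq : pvQ x = false := decide_eq_false h
        have hq' : ¬ pvQ x = true := by simp [hq]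
        have h2 : ¬ (x.1 ≠ "NO_CROP" ∧ pvC [] < x.2) := by
          intro ⟨h1, hlt⟩
          have hc1 : pvC [] = 1 := rfl
          rw [hc1] at hlt
          exact h ⟨h1, by omega⟩
        simp only [PySem.List.insertBy, List.find?_cons_of_neg hq', if_neg h2]
  | cons y ys ih =>
      have hytop : ∀ q ∈ ys, q.2 ≤ y.2 := fun q hq => (List.pairwise_cons.mp hs).1 q hq
      by_cases hb : pvBef x y = true
      · -- x inserted in front: y.2 < x.2, so every count in y::ys is < x.2
        have hyx : y.2 < x.2 := of_decide_eq_true hb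
        rw [insertBy_cons_pos pvBef x y ys hb]
        by_cases hq : pvQ x = true
        · have hcond : x.1 ≠ "NO_CROP" ∧ pvC (y :: ys) < x.2 := by
            have hx2 := (of_decide_eq_true hq : x.1 ≠ "NO_CROP" ∧ 2 ≤ x.2)
            refine ⟨hx2.1, ?_⟩
            cases hf : (y :: ys).find? pvQ with
            | none =>
                have hc1 : pvC (y :: ys) = 1 := by unfold pvC; rw [hf]
                rw [hc1]; omega
            | some p =>
                have hcp : pvC (y :: ys) = p.2 := by unfold pvC; rw [hf]
                rw [hcp]
                have hp := List.mem_of_find?_eq_some hf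
                rcases List.mem_cons.mp hp with h | h
                · subst h; omega
                · have := hytop p h; omega
          rw [List.find?_cons_of_pos hq, if_pos hcond]
        · have hcond : ¬ (x.1 ≠ "NO_CROP" ∧ pvC (y :: ys) < x.2) := by
            intro ⟨h1, _⟩
            have hy1 : (1:Int) ≤ y.2 := hs1 y (List.mem_cons_self)
            have hnot : ¬ (x.1 ≠ "NO_CROP" ∧ 2 ≤ x.2) := by
              intro hcontra; exact hq (by simp [pvQ, hcontra])
            exact hnot ⟨h1, by omega⟩
          rw [List.find?_cons_of_neg (by simp [Bool.not_eq_true] at hq ⊢; exact hq), if_neg hcond]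
      · -- x goes past y: x.2 ≤ y.2
        have hxy : ¬ (y.2 < x.2) := by simpa [pvBef] using hb
        rw [insertBy_cons_neg pvBef x y ys hb]
        by_cases hqy : pvQ y = true
        · -- y itself is the first pvQ element, with count ≥ x.2: nothing changes
          have hcond : ¬ (x.1 ≠ "NO_CROP" ∧ pvC (y :: ys) < x.2) := by
            intro ⟨_, hlt⟩
            have hCy : pvC (y :: ys) = y.2 := by
              unfold pvC; rw [List.find?_cons_of_pos hqy]
            omega
          rw [List.find?_cons_of_pos hqy, List.find?_cons_of_pos hqy, if_neg hcond]
        · have hqyf : pvQ y = false := by simpa [Bool.not_eq_true] using hqy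
          have hpair : ys.Pairwise (fun a b => b.2 ≤ a.2) := (List.pairwise_cons.mp hs).2
          have hys1 : ∀ p ∈ ys, 1 ≤ p.2 := fun p hp => hs1 p (List.mem_cons_of_mem _ hp)
          have hC : pvC (y :: ys) = pvC ys := by
            unfold pvC; rw [List.find?_cons_of_neg (by simp [hqyf])]
          rw [List.find?_cons_of_neg (by simp [hqyf]),
              List.find?_cons_of_neg (by simp [hqyf]),
              ih hpair hys1, hC]

-- the invariant: B's fold over L tracks find? pvQ on the insertion-sorted list
theorem fold_tracks_sorted (L : List (String × Int)) :
    ∀ (s : List (String × Int)),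
      s.Pairwise (fun a b => b.2 ≤ a.2) →
      (∀ p ∈ s, 1 ≤ p.2) →
      (∀ p ∈ L, 1 ≤ p.2) →
      (L.foldl pvStep ((s.find? pvQ).map (·.1), pvC s)).1 =
        ((L.foldl (fun acc x => PySem.List.insertBy pvBef x acc) s).find? pvQ).map (·.1) := by
  induction L with
  | nil => intro s _ _ _; rfl
  | cons x L ih =>
      intro s hs hs1 hL
      have hx : 1 ≤ x.2 := hL x (List.mem_cons_self)
      have hf := find?_insertBy x s hs hx hs1
      have hstep : pvStep ((s.find? pvQ).map (·.1), pvC s) x =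
          (((PySem.List.insertBy pvBef x s).find? pvQ).map (·.1),
            pvC (PySem.List.insertBy pvBef x s)) := by
        by_cases hc : x.1 ≠ "NO_CROP" ∧ pvC s < x.2
        · have hf' : (PySem.List.insertBy pvBef x s).find? pvQ = some x := by
            rw [hf, if_pos hc]
          have hC' : pvC (PySem.List.insertBy pvBef x s) = x.2 := by
            unfold pvC; rw [hf']
          rw [hf', hC']
          unfold pvStep
          rw [if_pos hc]
          rfl
        · have hf' : (PySem.List.insertBy pvBef x s).find? pvQ = s.find? pvQ := by
            rw [hf, if_neg hc]
          have hC' : pvC (PySem.List.insertBy pvBef x s) = pvC s := by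
            unfold pvC; rw [hf']
          rw [hf', hC']
          unfold pvStep
          rw [if_neg hc]
      have hpair' := PySem.List.insertBy_pairwise_ge (fun p : String × Int => p.2) x s hs
      have hs1' : ∀ p ∈ PySem.List.insertBy pvBef x s, 1 ≤ p.2 := by
        intro p hp
        rcases (PySem.List.mem_insertBy pvBef x p s).mp hp with h | h
        · subst h; exact hx
        · exact hs1 p h
      have hL' : ∀ p ∈ L, 1 ≤ p.2 := fun p hp => hL p (List.mem_cons_of_mem _ hp)
      calc ((x :: L).foldl pvStep ((s.find? pvQ).map (·.1), pvC s)).1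
          = (L.foldl pvStep (pvStep ((s.find? pvQ).map (·.1), pvC s) x)).1 := rfl
        _ = (L.foldl pvStep (((PySem.List.insertBy pvBef x s).find? pvQ).map (·.1),
              pvC (PySem.List.insertBy pvBef x s))).1 := by rw [hstep]
        _ = _ := ih _ hpair' hs1' hL'

-- every item of Counter(xs) has count ≥ 1
theorem counter_items_pos (xs : List String) :
    ∀ p ∈ (PySem.Dict.counter xs).items, 1 ≤ p.2 := by
  intro p hp
  rw [PySem.Dict.items_counter] at hp
  obtain ⟨k, hk, rfl⟩ := List.mem_map.mp hp
  have hmem : k ∈ xs := (PySem.Set.mem_ofList xs k).mp hk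
  have := List.count_pos_iff.mpr hmem
  simpa using this

-- B computed on the distinct items of Counter(xs) equals A's most_common scan
theorem alt_eq_find?_sorted (xs : List String) :
    quorum_py_alt xs =
      ((PySem.List.sorted (PySem.Dict.counter xs).items (fun p => p.2) true).find? pvQ).map (·.1) := by
  have h := fold_tracks_sorted (PySem.Dict.counter xs).items []
      (by simp) (by simp) (counter_items_pos xs)
  show ((xs.foldl (fun d v => d.insert v (d.getD v 0 + 1)) PySem.Dict.empty).items.foldl
      pvStep (none, 1)).1 = _
  rw [PySem.Dict.foldl_insert_getD_add_one_eq_counter,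
      PySem.List.sorted_rev_eq_foldl_insertBy]
  exact h

theorem quorum_eq (xs : List String) : quorum_py xs = quorum_py_alt xs := by
  match xs with
  | [] => rfl
  | [a] =>
      have hitems : (PySem.Dict.counter [a]).items = [(a, 1)] := by
        simp [PySem.Dict.counter, PySem.Dict.modify, PySem.Dict.empty,
              PySem.Dict.insert, PySem.Dict.getD, PySem.Dict.get?]
      have hA : quorum_py [a] = none := rfl
      rw [hA, alt_eq_find?_sorted, hitems]
      simp [PySem.List.sorted, PySem.List.insertBy, pvQ]
  | [a, b] =>
      have hA : quorum_py [a, b] = if a = b then (if a = "NO_CROP" then none else some a) else none := rfl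
      rw [hA, alt_eq_find?_sorted]
      by_cases hab : a = b
      · subst hab
        have hitems : (PySem.Dict.counter [a, a]).items = [(a, 2)] := by
          simp [PySem.Dict.counter, PySem.Dict.modify, PySem.Dict.empty,
                PySem.Dict.insert, PySem.Dict.getD, PySem.Dict.get?]
        rw [hitems]
        by_cases hN : a = "NO_CROP"
        · simp [hN, PySem.List.sorted, PySem.List.insertBy, pvQ]
        · simp [hN, PySem.List.sorted, PySem.List.insertBy, pvQ]
      · have hitems : (PySem.Dict.counter [a, b]).items = [(a, 1), (b, 1)] := by
          simp [PySem.Dict.counter, PySem.Dict.modify, PySem.Dict.empty,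
                PySem.Dict.insert, PySem.Dict.getD, PySem.Dict.get?, hab]
        rw [hitems]
        simp [hab, PySem.List.sorted, PySem.List.insertBy, pvQ]
  | a :: b :: c :: rest =>
      have hlen : ¬ ((a :: b :: c :: rest).length < 2) := by simp
      have hlen2 : ¬ ((a :: b :: c :: rest).length = 2) := by simp
      have hA : quorum_py (a :: b :: c :: rest) =
          match quorumForA (PySem.List.sorted (PySem.Dict.counter (a :: b :: c :: rest)).items
              (fun p => p.2) true) with
          | some v => some v
          | none => if 2 ≤ (PySem.Dict.counter (a :: b :: c :: rest)).getD "NO_CROP" 0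
                    then none else none := by
        unfold quorum_py
        rw [if_neg hlen, if_neg hlen2]
      rw [hA, alt_eq_find?_sorted, quorumForA_eq_find?]
      cases hf : ((PySem.List.sorted (PySem.Dict.counter (a :: b :: c :: rest)).items
          (fun p => p.2) true).find? pvQ) with
      | none =>
          simp only [Option.map_none]
          split <;> rfl
      | some p => rfl

-- ===== VERDICT (by name: the statement is the Claim_ definition above) =====
theorem quorum_py_spec : Claim_equal_quorum_py := by
  intro last_three _
  unfold Spec_quorum_py
  exact quorum_eq last_three
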